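-- pv_equiv track=rewrite | github.com/MortenHolmRep/ComputablePhaseMetrics | src/ComputablePhaseMetrics/cid/CID.py | lz77
-- ===== SOURCE A (Python) =====
-- def lz77(sequence):
--     sequence = ''.join(map(str, sequence))
--     sub_strings = set()
--     ind, inc = 0, 1
--     while True:
--         if ind + inc > len(sequence):
--             break
--         sub_str = sequence[ind : ind + inc]
--         if sub_str in sub_strings:
--             inc += 1
--         else:
--             sub_strings.add(sub_str)
--             ind += inc
--             inc = 1
--     return len(sequence), len(sub_strings)
-- ===== SOURCE B (Python) =====
-- def lz77(sequence):
--     sequence = ''.join(map(str, sequence))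
--     trie = {}
--     node = 0
--     next_id = 1
--     for ch in sequence:
--         child = trie.get((node, ch))
--         if child is None:
--             trie[(node, ch)] = next_id
--             next_id += 1
--             node = 0
--         else:
--             node = child
--     return len(sequence), next_id - 1
-- ===== Notes on version B (the rewrite author's own statement) =====
-- stated objective: alternative
-- what changed: Replaces A's set-of-substrings parse, which re-slices and re-hashes the whole growing phrase at every step, by an LZ78 trie stored as a flat dict keyed by (node id, char), extending the current phrase by one character per input character.
import Mathlib
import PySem

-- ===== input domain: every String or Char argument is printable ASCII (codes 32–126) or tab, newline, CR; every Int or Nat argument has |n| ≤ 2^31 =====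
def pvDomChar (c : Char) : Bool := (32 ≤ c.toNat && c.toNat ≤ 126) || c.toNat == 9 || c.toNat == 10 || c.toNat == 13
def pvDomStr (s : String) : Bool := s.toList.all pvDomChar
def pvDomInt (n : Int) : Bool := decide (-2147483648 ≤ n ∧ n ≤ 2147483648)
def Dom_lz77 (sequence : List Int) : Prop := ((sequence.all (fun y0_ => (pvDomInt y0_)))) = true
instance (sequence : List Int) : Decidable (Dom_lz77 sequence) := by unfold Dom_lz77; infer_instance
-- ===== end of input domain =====

-- B replaces A's set-of-substrings LZ78 parse (which re-slices the growing phrase at every step)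
-- by a trie kept as a flat dict keyed by (node id, char), extending the current phrase by one
-- character per input character; objective: alternative (O(1) dict work per character instead of
-- per-step slicing of the growing phrase).

-- ===== PORT A =====
-- A's while-loop: ind/inc cursor over the digit string, set of phrases seen so far.
-- s[ind:ind+inc] is ported as (L.drop ind).take inc, exact here since 0 ≤ ind and ind+inc ≤ len(s).
def lz77Loop (L : List Char) (subs : PySem.Set (List Char)) (ind inc : Nat) : Int :=
  if ind + inc > L.length then PySem.Set.len subs
  else
    let sub := (L.drop ind).take inc
    if PySem.Set.contains subs sub then lz77Loop L subs ind (inc + 1)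
    else lz77Loop L (PySem.Set.add subs sub) (ind + inc) 1
termination_by 2 * (L.length + 1) - (2 * ind + inc)
decreasing_by all_goals omega

def lz77 (sequence : List Int) : List Int :=
  let s := PySem.Chars.join [] (sequence.map PySem.Int.toChars)  -- ''.join(map(str, sequence))
  [(s.length : Int), lz77Loop s PySem.Set.empty 0 1]

-- ===== PORT B =====
-- one step of B's for-loop: state = (trie, current node id, next free id)
def lz77AltStep (st : PySem.Dict (Int × Char) Int × Int × Int) (ch : Char) :
    PySem.Dict (Int × Char) Int × Int × Int :=
  match st.1.get? (st.2.1, ch) with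
  | none => (st.1.insert (st.2.1, ch) st.2.2, 0, st.2.2 + 1)
  | some child => (st.1, child, st.2.2)

def lz77_alt (sequence : List Int) : List Int :=
  let s := PySem.Chars.join [] (sequence.map PySem.Int.toChars)  -- ''.join(map(str, sequence))
  let st := s.foldl lz77AltStep (PySem.Dict.empty, 0, 1)
  [(s.length : Int), st.2.2 - 1]

-- ===== PRECONDITION & SPEC =====
def Spec_lz77 (sequence : List Int) (out : List Int) : Prop := out = lz77_alt sequence
instance (sequence : List Int) (out : List Int) : Decidable (Spec_lz77 sequence out) := by unfold Spec_lz77; infer_instance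

-- ===== CLAIM (what is proved, stated in full; the proofs are below) =====
def Claim_equal_lz77 : Prop := ∀ (sequence : List Int), Dom_lz77 sequence → Spec_lz77 sequence (lz77 sequence)

-- ===== LEMMAS AND PROOFS =====

-- resolve D i x : follow the trie edges of D from node i along the characters of x
def resolve (D : PySem.Dict (Int × Char) Int) (i : Int) : List Char → Option Int
  | [] => some i
  | c :: cs =>
    match D.get? (i, c) with
    | none => none
    | some j => resolve D j cs

lemma resolve_append (D : PySem.Dict (Int × Char) Int) (xs : List Char) :
    ∀ (i : Int) (ys : List Char),
      resolve D i (xs ++ ys) = (resolve D i xs).bind (fun j => resolve D j ys) := by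
  induction xs with
  | nil => intro i ys; simp [resolve]
  | cons c cs ih =>
    intro i ys
    simp only [List.cons_append, resolve]
    cases h : D.get? (i, c) with
    | none => simp
    | some j => simp [ih]

-- the invariant tying A's set of phrases to B's trie
structure TrieInv (S : PySem.Set (List Char)) (D : PySem.Dict (Int × Char) Int)
    (next : Int) : Prop where
  mem : ∀ x, x ∈ S ↔ (x ≠ [] ∧ (resolve D 0 x).isSome)
  size : PySem.Set.len S = next - 1
  range : ∀ x i, resolve D 0 x = some i → 0 ≤ i ∧ i < next
  pos1 : ∀ x i, x ≠ [] → resolve D 0 x = some i → 1 ≤ i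
  inj : ∀ x y i, resolve D 0 x = some i → resolve D 0 y = some i → x = y
  keys : ∀ k ∈ D.keys, 0 ≤ k.1 ∧ k.1 < next

lemma trieInv_one_le_next {S D next} (hI : TrieInv S D next) : 1 ≤ next := by
  have h := hI.size
  have : (0 : Int) ≤ PySem.Set.len S := by
    simp [PySem.Set.len]
  omega

lemma resolve_insert_mono (D : PySem.Dict (Int × Char) Int) (k : Int × Char) (v : Int)
    (habs : D.get? k = none) (x : List Char) :
    ∀ (j i : Int), resolve D j x = some i → resolve (D.insert k v) j x = some i := by
  induction x with
  | nil => intro j i h; simpa [resolve] using h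
  | cons c cs ih =>
    intro j i h
    simp only [resolve] at h ⊢
    cases hg : D.get? (j, c) with
    | none => rw [hg] at h; exact absurd h (by simp)
    | some m =>
      rw [hg] at h
      have hne : (j, c) ≠ k := by
        intro he; rw [he, habs] at hg; exact absurd hg (by simp)
      rw [PySem.Dict.get?_insert_of_ne D v hne, hg]
      exact ih m i h

-- any resolution in the trie with one fresh edge added is an old resolution or ends at the new node
lemma resolve_insert_new_aux (D : PySem.Dict (Int × Char) Int) (p : List Char)
    (node next : Int) (c : Char)
    (hkeys : ∀ k ∈ D.keys, k.1 < next)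
    (hnode : node < next)
    (hinj : ∀ x y i, resolve D 0 x = some i → resolve D 0 y = some i → x = y)
    (hp : resolve D 0 p = some node)
    (habs : D.get? (node, c) = none) (x : List Char) :
    ∀ (j : Int) (y : List Char) (i : Int), resolve D 0 y = some j →
      resolve (D.insert (node, c) next) j x = some i →
      resolve D j x = some i ∨ (y ++ x = p ++ [c] ∧ i = next) := by
  induction x with
  | nil =>
    intro j y i _ h
    left; simpa [resolve] using h
  | cons c' cs ih =>
    intro j y i hy h
    by_cases he : (j, c') = (node, c)
    · -- the new edge is taken: it leads to the fresh node, which has no outgoing edges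
      have h1 : j = node := congrArg Prod.fst he
      have h2 : c' = c := congrArg Prod.snd he
      subst h1; subst h2
      simp only [resolve, PySem.Dict.get?_insert_self] at h
      cases cs with
      | nil =>
        right
        have hi : i = next := by simpa [resolve] using h.symm
        have hyp : y = p := hinj y p j hy hp
        exact ⟨by rw [hyp], hi⟩
      | cons c'' cs' =>
        exfalso
        simp only [resolve] at h
        cases hg : (D.insert (j, c') next).get? (next, c'') with
        | none => rw [hg] at h; simp at h
        | some m =>
          have hmem : (next, c'') ∈ (D.insert (j, c') next).keys := by
            by_contra hnm
            rw [(PySem.Dict.get?_eq_none_iff_not_mem_keys _ _).mpr hnm] at hg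
            exact absurd hg (by simp)
          rcases (PySem.Dict.mem_keys_insert D (j, c') (next, c'') next).mp hmem with h1 | h1
          · have : next = j := congrArg Prod.fst h1
            omega
          · have := hkeys _ h1
            omega
    · -- an old edge (or none) is taken
      simp only [resolve, PySem.Dict.get?_insert_of_ne D next he] at h ⊢
      cases hg : D.get? (j, c') with
      | none => rw [hg] at h; exact absurd h (by simp)
      | some m =>
        rw [hg] at h
        have hy' : resolve D 0 (y ++ [c']) = some m := by
          rw [resolve_append, hy]
          simp [resolve, hg]
        rcases ih m (y ++ [c']) i hy' h with h1 | h1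
        · left; exact h1
        · right; rw [List.append_assoc] at h1; exact h1

lemma resolve_insert_self (D : PySem.Dict (Int × Char) Int) (p : List Char)
    (node next : Int) (c : Char)
    (hp : resolve D 0 p = some node)
    (habs : D.get? (node, c) = none) :
    resolve (D.insert (node, c) next) 0 (p ++ [c]) = some next := by
  rw [resolve_append, resolve_insert_mono D (node, c) next habs p 0 node hp]
  simp [resolve, PySem.Dict.get?_insert_self]

lemma trieInv_insert {S D next} (p : List Char) (node : Int) (c : Char)
    (hI : TrieInv S D next)
    (hp : resolve D 0 p = some node)
    (habs : D.get? (node, c) = none)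
    (hmem : p ++ [c] ∉ S) :
    TrieInv (PySem.Set.add S (p ++ [c])) (D.insert (node, c) next) (next + 1) := by
  have hone : 1 ≤ next := trieInv_one_le_next hI
  have hnode : node < next := (hI.range p node hp).2
  have haux := resolve_insert_new_aux D p node next c
    (fun k hk => (hI.keys k hk).2) hnode hI.inj hp habs
  have hself := resolve_insert_self D p node next c hp habs
  refine ⟨?_, ?_, ?_, ?_, ?_, ?_⟩
  · intro x
    rw [PySem.Set.mem_add]
    constructor
    · rintro (hx | hx)
      · rcases (hI.mem x).mp hx with ⟨hne, hs⟩
        rcases Option.isSome_iff_exists.mp hs with ⟨i, hi⟩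
        exact ⟨hne, by rw [resolve_insert_mono D (node, c) next habs x 0 i hi]; rfl⟩
      · subst hx
        exact ⟨by simp, by rw [hself]; rfl⟩
    · rintro ⟨hne, hs⟩
      rcases Option.isSome_iff_exists.mp hs with ⟨i, hi⟩
      rcases haux x 0 [] i rfl hi with h1 | h1
      · left; exact (hI.mem x).mpr ⟨hne, by rw [h1]; rfl⟩
      · right; simpa using h1.1
  · rw [PySem.Set.add_of_not_mem hmem]
    have := hI.size
    simp only [PySem.Set.len, List.length_append, List.length_cons, List.length_nil] at this ⊢
    push_cast
    omega
  · intro x i hi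
    rcases haux x 0 [] i rfl hi with h1 | h1
    · have := hI.range x i h1; omega
    · omega
  · intro x i hne hi
    rcases haux x 0 [] i rfl hi with h1 | h1
    · exact hI.pos1 x i hne h1
    · omega
  · intro x y i hx hy
    rcases haux x 0 [] i rfl hx with h1 | h1 <;>
      rcases haux y 0 [] i rfl hy with h2 | h2
    · exact hI.inj x y i h1 h2
    · have := hI.range x i h1; omega
    · have := hI.range y i h2; omega
    · rw [show x = p ++ [c] by simpa using h1.1, show y = p ++ [c] by simpa using h2.1]
  · intro k hk
    rcases (PySem.Dict.mem_keys_insert D (node, c) k next).mp hk with h1 | h1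
    · subst h1
      have h0 : 0 ≤ node := (hI.range p node hp).1
      exact ⟨h0, by omega⟩
    · have := hI.keys k h1; omega

lemma trieInv_init : TrieInv PySem.Set.empty PySem.Dict.empty 1 := by
  have hres : ∀ (x : List Char) (i : Int),
      resolve PySem.Dict.empty 0 x = some i → x = [] ∧ i = 0 := by
    intro x i h
    cases x with
    | nil => exact ⟨rfl, by simpa [resolve] using h.symm⟩
    | cons c cs => simp [resolve, PySem.Dict.get?_empty] at h
  refine ⟨?_, ?_, ?_, ?_, ?_, ?_⟩
  · intro x
    constructor
    · intro hx; exact absurd hx (by simp [PySem.Set.empty])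
    · rintro ⟨hne, hs⟩
      rcases Option.isSome_iff_exists.mp hs with ⟨i, hi⟩
      exact absurd (hres x i hi).1 hne
  · simp [PySem.Set.len, PySem.Set.empty]
  · intro x i hi; rcases hres x i hi with ⟨_, h⟩; omega
  · intro x i hne hi; exact absurd (hres x i hi).1 hne
  · intro x y i hx hy; rw [(hres x i hx).1, (hres y i hy).1]
  · intro k hk; exact absurd hk (by simp [PySem.Dict.empty, PySem.Dict.keys])

-- the simulation: A's loop state corresponds to B's fold over the remaining characters
theorem lz77_sim (L : List Char) (S : PySem.Set (List Char))
    (D : PySem.Dict (Int × Char) Int) (node next : Int) (ind inc : Nat)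
    (h1 : 1 ≤ inc) (h2 : ind + (inc - 1) ≤ L.length)
    (hI : TrieInv S D next)
    (hp : resolve D 0 ((L.drop ind).take (inc - 1)) = some node) :
    lz77Loop L S ind inc =
      ((L.drop (ind + (inc - 1))).foldl lz77AltStep (D, node, next)).2.2 - 1 := by
  by_cases hg : ind + inc > L.length
  · -- A breaks; B has no characters left
    have hpos : ind + (inc - 1) = L.length := by omega
    rw [lz77Loop]
    simp only [hg, if_true, hpos, List.drop_length, List.foldl_nil]
    exact hI.size
  · have hlt : ind + (inc - 1) < L.length := by omega
    have hdrop : L.drop (ind + (inc - 1)) =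
        L[ind + (inc - 1)] :: L.drop (ind + (inc - 1) + 1) :=
      List.drop_eq_getElem_cons hlt
    set c := L[ind + (inc - 1)] with hc
    have hsub : (L.drop ind).take inc = (L.drop ind).take (inc - 1) ++ [c] := by
      have hinc : inc = (inc - 1) + 1 := by omega
      rw [hinc, List.take_add_one]
      have : (L.drop ind)[inc - 1]? = some c := by
        rw [List.getElem?_drop]
        exact List.getElem?_eq_getElem hlt
      rw [this]
      rfl
    set p := (L.drop ind).take (inc - 1) with hpdef
    have hres_sub : resolve D 0 ((L.drop ind).take inc) = D.get? (node, c) := by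
      rw [hsub, resolve_append, hp]
      simp only [Option.bind_some]
      show (match D.get? (node, c) with
            | none => none
            | some j => resolve D j []) = D.get? (node, c)
      cases D.get? (node, c) <;> rfl
    rw [lz77Loop]
    simp only [hg, if_false]
    by_cases hin : PySem.Set.contains S ((L.drop ind).take inc) = true
    · -- phrase already known: A extends inc, B walks down an existing edge
      have hmemS : (L.drop ind).take inc ∈ S := (PySem.Set.contains_iff S _).mp hin
      rcases Option.isSome_iff_exists.mp ((hI.mem _).mp hmemS).2 with ⟨j, hj⟩
      have hget : D.get? (node, c) = some j := by rw [← hres_sub]; exact hj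
      rw [if_pos hin, hdrop, List.foldl_cons]
      have hstep : lz77AltStep (D, node, next) c = (D, j, next) := by
        simp [lz77AltStep, hget]
      rw [hstep, show ind + (inc - 1) + 1 = ind + (inc + 1 - 1) from by omega]
      exact lz77_sim L S D j next ind (inc + 1) (by omega) (by omega) hI
        (by simpa [Nat.add_sub_cancel] using hj)
    · -- new phrase: A records it and restarts, B adds a trie edge and returns to the root
      have hnmem : (L.drop ind).take inc ∉ S := by
        intro hmm; exact hin ((PySem.Set.contains_iff S _).mpr hmm)
      have hget : D.get? (node, c) = none := by
        cases hg2 : D.get? (node, c) with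
        | none => rfl
        | some m =>
          exfalso
          apply hnmem
          refine (hI.mem _).mpr ⟨?_, ?_⟩
          · rw [hsub]; simp
          · rw [hres_sub, hg2]; rfl
      rw [if_neg hin, hdrop, List.foldl_cons]
      have hstep : lz77AltStep (D, node, next) c = (D.insert (node, c) next, 0, next + 1) := by
        simp [lz77AltStep, hget]
      rw [hstep]
      have hI' : TrieInv (PySem.Set.add S ((L.drop ind).take inc))
          (D.insert (node, c) next) (next + 1) := by
        rw [hsub]
        exact trieInv_insert p node c hI hp hget (hsub ▸ hnmem)
      rw [show ind + (inc - 1) + 1 = ind + inc + (1 - 1) from by omega]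
      exact lz77_sim L (PySem.Set.add S ((L.drop ind).take inc))
        (D.insert (node, c) next) 0 (next + 1) (ind + inc) 1 (by omega) (by omega) hI'
        (by simp [resolve])
termination_by 2 * (L.length + 1) - (2 * ind + inc)
decreasing_by all_goals omega

-- ===== VERDICT (by name: the statement is the Claim_ definition above) =====
theorem lz77_spec : Claim_equal_lz77 := by
  intro sequence _hdom
  unfold Spec_lz77 lz77 lz77_alt
  set L := PySem.Chars.join [] (sequence.map PySem.Int.toChars) with hL
  have := lz77_sim L PySem.Set.empty PySem.Dict.empty 0 1 0 1 (by omega) (by omega)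
    trieInv_init (by simp [resolve])
  simpa using this
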